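-- pv_equiv track=rewrite | github.com/ErofeevVV/EducationUrban | module_9_3.py | length_check
-- ===== SOURCE A (Python) =====
-- def length_check(list1, list2):
--     results = []
--     max_length = max(len(list1), len(list2))
--     for i in range(max_length):
--         try:
--             element1 = list1[i]
--             element2 = list2[i]
--             if len(element1) == len(element2):
--                 results.append(True)
--             else:
--                 results.append(False)
--         except IndexError:
--             results.append(False)
--     return results
-- ===== SOURCE B (Python) =====
-- def length_check(list1, list2):
--     common = min(len(list1), len(list2))
--
--     def solve(lo, hi):
--         # booleans for positions [lo, hi) of the common prefix, by splitting
--         if hi - lo <= 0: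
--             return []
--         if hi - lo == 1:
--             return [len(list1[lo]) == len(list2[lo])]
--         mid = (lo + hi) // 2
--         return solve(lo, mid) + solve(mid, hi)
--
--     return solve(0, common) + [False] * (max(len(list1), len(list2)) - common)
-- ===== Notes on version B (the rewrite author's own statement) =====
-- stated objective: alternative
-- what changed: Replaces A's single indexed loop with try/except IndexError by a divide-and-conquer recursion that splits the common prefix at the midpoint and concatenates the halves, then appends a False block for the length difference; no indexing past the end and no exception handling.
import Mathlib
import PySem

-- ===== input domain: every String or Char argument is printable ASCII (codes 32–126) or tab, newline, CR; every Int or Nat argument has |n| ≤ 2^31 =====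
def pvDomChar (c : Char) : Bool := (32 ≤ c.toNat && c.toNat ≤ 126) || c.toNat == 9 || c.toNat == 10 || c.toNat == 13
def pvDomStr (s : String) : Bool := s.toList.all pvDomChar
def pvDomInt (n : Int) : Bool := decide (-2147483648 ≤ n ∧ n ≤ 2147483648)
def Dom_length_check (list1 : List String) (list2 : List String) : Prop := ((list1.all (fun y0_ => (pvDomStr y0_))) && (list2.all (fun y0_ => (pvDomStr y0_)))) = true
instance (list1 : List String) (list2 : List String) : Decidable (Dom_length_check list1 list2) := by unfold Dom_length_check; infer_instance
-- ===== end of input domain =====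

-- B replaces A's indexed loop with try/except by a divide-and-conquer recursion splitting the common prefix at the midpoint, plus a False block for the length difference (objective: alternative).

-- ===== PORT A =====
-- literal port: for i in range(max(len,len)) with xs[i] via pyGet? (none = IndexError → append False)
def length_check (list1 : List String) (list2 : List String) : List Bool :=
  (PySem.List.pyRange 0 (max (PySem.List.len list1) (PySem.List.len list2)) 1).foldl
    (fun results i =>
      match PySem.List.pyGet? list1 i, PySem.List.pyGet? list2 i with
      | some e1, some e2 =>
          if PySem.Str.len e1 == PySem.Str.len e2 then results ++ [true] else results ++ [false]
      | _, _ => results ++ [false])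
    []

-- ===== PORT B =====
-- solve(lo, hi): booleans for positions [lo, hi) of the common prefix by midpoint splitting;
-- the extra Nat fuel (= hi - lo at the top call) is only a structural-termination guard;
-- list1[lo]/list2[lo] are always in range at the leaf (lo < min length), so getD "" is exact there
def pvSolve (list1 list2 : List String) (fuel : Nat) (lo hi : Int) : List Bool :=
  match fuel with
  | 0 => []
  | f + 1 =>
    if hi - lo ≤ 0 then []
    else if hi - lo = 1 then
      [PySem.Str.len ((PySem.List.pyGet? list1 lo).getD "") == PySem.Str.len ((PySem.List.pyGet? list2 lo).getD "")]
    else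
      pvSolve list1 list2 f lo (PySem.Int.floordiv (lo + hi) 2) ++
      pvSolve list1 list2 f (PySem.Int.floordiv (lo + hi) 2) hi

def length_check_alt (list1 : List String) (list2 : List String) : List Bool :=
  pvSolve list1 list2 (min (PySem.List.len list1) (PySem.List.len list2)).toNat 0
    (min (PySem.List.len list1) (PySem.List.len list2)) ++
  List.replicate ((max (PySem.List.len list1) (PySem.List.len list2) -
                   min (PySem.List.len list1) (PySem.List.len list2))).toNat false

-- ===== PRECONDITION & SPEC =====
def Spec_length_check (list1 : List String) (list2 : List String) (out : List Bool) : Prop := out = length_check_alt list1 list2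
instance (list1 : List String) (list2 : List String) (out : List Bool) : Decidable (Spec_length_check list1 list2 out) := by unfold Spec_length_check; infer_instance

-- ===== CLAIM (what is proved, stated in full; the proofs are below) =====
def Claim_equal_length_check : Prop := ∀ (list1 : List String) (list2 : List String), Dom_length_check list1 list2 → Spec_length_check list1 list2 (length_check list1 list2)

-- ===== LEMMAS AND PROOFS =====

def pvBody (list1 list2 : List String) (i : Int) : Bool :=
  match PySem.List.pyGet? list1 i, PySem.List.pyGet? list2 i with
  | some e1, some e2 => PySem.Str.len e1 == PySem.Str.len e2
  | _, _ => false

def pvB (list1 list2 : List String) (i : Int) : Bool :=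
  PySem.Str.len ((PySem.List.pyGet? list1 i).getD "") == PySem.Str.len ((PySem.List.pyGet? list2 i).getD "")

theorem pvBody_fold (list1 list2 : List String) (l : List Int) (acc : List Bool) :
    l.foldl
      (fun results i =>
        match PySem.List.pyGet? list1 i, PySem.List.pyGet? list2 i with
        | some e1, some e2 =>
            if PySem.Str.len e1 == PySem.Str.len e2 then results ++ [true] else results ++ [false]
        | _, _ => results ++ [false]) acc
    = acc ++ l.map (pvBody list1 list2) := by
  have : (fun (results : List Bool) (i : Int) =>
      match PySem.List.pyGet? list1 i, PySem.List.pyGet? list2 i with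
      | some e1, some e2 =>
          if PySem.Str.len e1 == PySem.Str.len e2 then results ++ [true] else results ++ [false]
      | _, _ => results ++ [false])
      = fun results i => results ++ [pvBody list1 list2 i] := by
    funext results i
    unfold pvBody
    rcases PySem.List.pyGet? list1 i with _ | e1 <;> rcases PySem.List.pyGet? list2 i with _ | e2 <;> simp <;> split <;> simp_all
  rw [this, PySem.List.foldl_append_singleton_eq_map]

-- divide-and-conquer equals the segment map (fuel at least the segment length)
theorem pvSolve_eq (list1 list2 : List String) :
    ∀ (fuel n : Nat) (lo hi : Int), (hi - lo).toNat = n → n ≤ fuel →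
      pvSolve list1 list2 fuel lo hi = (List.range n).map (fun k : Nat => pvB list1 list2 (lo + k)) := by
  intro fuel
  induction fuel with
  | zero =>
    intro n lo hi hn hf
    have : n = 0 := by omega
    simp [pvSolve, this]
  | succ f ih =>
    intro n lo hi hn hf
    rw [pvSolve]
    split
    · rename_i h0
      have : n = 0 := by omega
      simp [this]
    · split
      · rename_i h0 h1
        have : n = 1 := by omega
        simp [this, pvB]
      · rename_i h0 h1
        have hm : PySem.Int.floordiv (lo + hi) 2 * 2 + (lo + hi) % 2 = lo + hi := by
          rw [← PySem.Int.mod_eq_emod_of_pos (by norm_num : (0:Int) < 2)]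
          exact PySem.Int.floordiv_mul_add_mod _ _
        set mid := PySem.Int.floordiv (lo + hi) 2 with hmid
        have hlom : lo < mid := by omega
        have hmhi : mid < hi := by omega
        rw [ih (mid - lo).toNat lo mid rfl (by omega),
            ih (hi - mid).toNat mid hi rfl (by omega)]
        have hsplit : n = (mid - lo).toNat + (hi - mid).toNat := by omega
        rw [hsplit, List.range_add, List.map_append, List.map_map]
        congr 1
        apply List.map_congr_left
        intro k _
        simp only [Function.comp]
        congr 1
        omega

-- on the common prefix A's body equals B's leaf
theorem pvBody_eq_pvB (list1 list2 : List String) (k : Nat)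
    (h : k < min list1.length list2.length) :
    pvBody list1 list2 (k : Int) = pvB list1 list2 (k : Int) := by
  have h1 : list1[k]? = some list1[k] := List.getElem?_eq_getElem (by omega)
  have h2 : list2[k]? = some list2[k] := List.getElem?_eq_getElem (by omega)
  simp [pvBody, pvB, PySem.List.pyGet?_natCast, h1, h2]

-- past the common prefix A's body is False
theorem pvBody_tail (list1 list2 : List String) (k : Nat)
    (h : min list1.length list2.length ≤ k) :
    pvBody list1 list2 (k : Int) = false := by
  unfold pvBody
  simp only [PySem.List.pyGet?_natCast]
  rcases h1 : list1[k]? with _ | e1 <;> rcases h2 : list2[k]? with _ | e2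
  · rfl
  · rfl
  · rfl
  · exfalso
    obtain ⟨hk1, -⟩ := List.getElem?_eq_some_iff.mp h1
    obtain ⟨hk2, -⟩ := List.getElem?_eq_some_iff.mp h2
    omega

-- the range-max map of A's body = prefix map of B's leaf ++ False block
theorem pvMain (list1 list2 : List String) :
    (List.range (max list1.length list2.length)).map (fun k : Nat => pvBody list1 list2 (k : Int))
      = (List.range (min list1.length list2.length)).map (fun k : Nat => pvB list1 list2 ((0 : Int) + k))
        ++ List.replicate (max list1.length list2.length - min list1.length list2.length) false := by
  have hsplit : max list1.length list2.length
      = min list1.length list2.length + (max list1.length list2.length - min list1.length list2.length) := by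
    omega
  conv_lhs => rw [hsplit]
  rw [List.range_add, List.map_append, List.map_map]
  congr 1
  · apply List.map_congr_left
    intro k hk
    rw [show ((0 : Int) + (k : Nat)) = ((k : Nat) : Int) by ring]
    exact pvBody_eq_pvB list1 list2 k (List.mem_range.mp hk)
  · have hc : ∀ k ∈ List.range (max list1.length list2.length - min list1.length list2.length),
        ((fun k : Nat => pvBody list1 list2 (k : Int)) ∘ (fun x : Nat => min list1.length list2.length + x)) k
          = (fun _ : Nat => false) k := by
      intro k _
      simp only [Function.comp]
      exact pvBody_tail list1 list2 (min list1.length list2.length + k) (by omega)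
    rw [List.map_congr_left hc, List.map_const', List.length_range]

-- ===== VERDICT (by name: the statement is the Claim_ definition above) =====
theorem length_check_spec : Claim_equal_length_check := by
  intro list1 list2 _
  unfold Spec_length_check length_check length_check_alt
  rw [pvBody_fold]
  have hmax : max (PySem.List.len list1) (PySem.List.len list2)
      = ((max list1.length list2.length : Nat) : Int) := by
    simp [Nat.cast_max]
  have hmin : min (PySem.List.len list1) (PySem.List.len list2)
      = ((min list1.length list2.length : Nat) : Int) := by
    simp [Nat.cast_min]
  rw [hmax, hmin, PySem.List.pyRange_zero_natCast,
      pvSolve_eq list1 list2 (((min list1.length list2.length : Nat) : Int)).toNat (min list1.length list2.length) 0 _ (by omega) (by omega),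
      show (((max list1.length list2.length : Nat) : Int)
            - ((min list1.length list2.length : Nat) : Int)).toNat
          = max list1.length list2.length - min list1.length list2.length from by omega,
      List.map_map]
  simp only [Function.comp_def]
  exact pvMain list1 list2
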